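-- pv_equiv track=rewrite | github.com/escossio/tcp-brain | scripts/tcp_detection_engine.py | window_counts
-- ===== SOURCE A (Python) =====
-- from collections import Counter, defaultdict
-- from typing import Any, Dict, Iterable, Iterator, List, Optional, Sequence, Tuple
--
-- def window_counts(items: List[str], window_size: int, stride: int) -> Dict[str, List[int]]:
--     counts: Dict[str, List[int]] = defaultdict(list)
--     if not items or window_size <= 0:
--         return counts
--     for start in range(0, max(len(items) - window_size + 1, 1), stride):
--         window = items[start : start + window_size]
--         c = Counter(window)
--         for family, value in c.items():
--             counts[family].append(value)
--     return counts
-- ===== SOURCE B (Python) =====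
-- def window_counts(items, window_size, stride):
--     # Incremental sliding-window counter: per step only the items leaving and
--     # entering the window are removed/added, instead of recounting each window.
--     counts = {}
--     n = len(items)
--     if n == 0 or window_size <= 0:
--         return counts
--     cur = {}
--     prev_lo = prev_hi = 0
--     for start in range(0, max(n - window_size + 1, 1), stride):
--         lo = start
--         hi = min(start + window_size, n)
--         for f in items[prev_lo:min(lo, prev_hi)]:
--             c = cur[f] - 1
--             if c:
--                 cur[f] = c
--             else:
--                 del cur[f]
--         for f in items[max(lo, prev_hi):hi]:
--             cur[f] = cur.get(f, 0) + 1
--         prev_lo, prev_hi = lo, hi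
--         for f, v in cur.items():
--             counts.setdefault(f, []).append(v)
--     return counts
-- ===== Notes on version B (the rewrite author's own statement) =====
-- stated objective: alternative
-- what changed: Replaces per-window slicing plus a fresh Counter for every window with one incremental sliding counter that only removes the items leaving and adds the items entering the window at each stride step.
import Mathlib
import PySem

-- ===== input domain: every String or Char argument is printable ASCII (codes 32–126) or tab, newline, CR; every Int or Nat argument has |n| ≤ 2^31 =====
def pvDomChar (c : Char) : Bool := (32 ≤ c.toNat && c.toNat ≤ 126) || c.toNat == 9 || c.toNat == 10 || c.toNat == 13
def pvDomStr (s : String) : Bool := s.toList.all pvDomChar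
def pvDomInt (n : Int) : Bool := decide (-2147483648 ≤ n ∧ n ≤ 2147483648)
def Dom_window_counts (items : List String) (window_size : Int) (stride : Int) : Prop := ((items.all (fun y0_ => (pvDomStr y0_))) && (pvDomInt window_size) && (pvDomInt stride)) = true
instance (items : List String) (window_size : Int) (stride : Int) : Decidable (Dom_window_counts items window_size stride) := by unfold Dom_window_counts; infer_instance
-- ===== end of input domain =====

-- B (same return value) replaces A's per-window slice+Counter with one incremental
-- sliding counter that removes leaving / adds entering items at each stride step.

-- shared helper: the inner append loop 'for family, value in …: counts[family].append(value)'
-- (A: defaultdict; B: setdefault — both amount to counts[f] = counts.get(f, []) + [v])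
def wcFlush (cur : PySem.Dict String Int) (counts : PySem.Dict String (List Int)) :
    PySem.Dict String (List Int) :=
  cur.items.foldl (fun d p => d.modify p.1 [] fun x => x ++ [p.2]) counts

-- ===== PORT A =====
def wcStepA (items : List String) (window_size : Int)
    (counts : PySem.Dict String (List Int)) (start : Int) : PySem.Dict String (List Int) :=
  wcFlush (PySem.Dict.counter (PySem.List.slice items (some start) (some (start + window_size)))) counts

def window_counts (items : List String) (window_size : Int) (stride : Int) :
    List (String × List Int) :=
  if items = [] ∨ window_size ≤ 0 then []
  else
    ((PySem.List.pyRange 0 (max ((items.length : Int) - window_size + 1) 1) stride).foldl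
      (wcStepA items window_size) PySem.Dict.empty).items

-- ===== PORT B =====
-- 'c = cur[f] - 1' can never miss where B runs it; getD is its total form
def wcRemove (cur : PySem.Dict String Int) (f : String) : PySem.Dict String Int :=
  let c := cur.getD f 0 - 1
  if c ≠ 0 then cur.insert f c else cur.erase f

def wcAdd (cur : PySem.Dict String Int) (f : String) : PySem.Dict String Int :=
  cur.insert f (cur.getD f 0 + 1)

def wcStepB (items : List String) (window_size n : Int)
    (st : PySem.Dict String (List Int) × PySem.Dict String Int × Int × Int) (start : Int) :
    PySem.Dict String (List Int) × PySem.Dict String Int × Int × Int :=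
  let lo := start
  let hi := min (start + window_size) n
  let cur₁ := (PySem.List.slice items (some st.2.2.1) (some (min lo st.2.2.2))).foldl wcRemove st.2.1
  let cur₂ := (PySem.List.slice items (some (max lo st.2.2.2)) (some hi)).foldl wcAdd cur₁
  (wcFlush cur₂ st.1, cur₂, lo, hi)

def window_counts_alt (items : List String) (window_size : Int) (stride : Int) :
    List (String × List Int) :=
  let n : Int := items.length
  if items = [] ∨ window_size ≤ 0 then []
  else
    (((PySem.List.pyRange 0 (max (n - window_size + 1) 1) stride).foldl
      (wcStepB items window_size n)
      (PySem.Dict.empty, PySem.Dict.empty, 0, 0)).1).items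

-- ===== PRECONDITION & SPEC =====
-- Pre_ excludes exactly the inputs where A raises: stride == 0 reaching range() is a ValueError.
def Pre_window_counts (items : List String) (window_size : Int) (stride : Int) : Prop :=
  items = [] ∨ window_size ≤ 0 ∨ stride ≠ 0
instance (items : List String) (window_size : Int) (stride : Int) :
    Decidable (Pre_window_counts items window_size stride) := by
  unfold Pre_window_counts; infer_instance

def pvWitness_window_counts : List String × Int × Int := (["a", "b", "a", "c"], 2, 1)

def Spec_window_counts (items : List String) (window_size : Int) (stride : Int)
    (out : List (String × List Int)) : Prop := out = window_counts_alt items window_size stride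
instance (items : List String) (window_size : Int) (stride : Int) (out : List (String × List Int)) :
    Decidable (Spec_window_counts items window_size stride out) := by
  unfold Spec_window_counts; infer_instance

-- ===== CLAIM (what is proved, stated in full; the proofs are below) =====
def Claim_equal_window_counts : Prop := ∀ (items : List String) (window_size : Int) (stride : Int), Dom_window_counts items window_size stride → Pre_window_counts items window_size stride → Spec_window_counts items window_size stride (window_counts items window_size stride)

-- ===== LEMMAS AND PROOFS =====

def cntLk (m : List String) (f : String) : Option Int :=
  if m.count f = 0 then none else some (m.count f)
theorem dict_get?_eq_ite {κ ν : Type} [BEq κ] (d : PySem.Dict κ ν) (k : κ) (d0 : ν) :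
    d.get? k = if d.contains k = true then some (d.getD k d0) else none := by
  rw [PySem.Dict.contains_eq_isSome_get?, PySem.Dict.getD_eq_get?_getD]
  cases d.get? k <;> simp
theorem counter_get? (m : List String) (f : String) :
    (PySem.Dict.counter m).get? f = cntLk m f := by
  rw [dict_get?_eq_ite _ _ 0, PySem.Dict.contains_counter, PySem.Dict.getD_counter]
  unfold cntLk
  by_cases h : f ∈ m
  · have : m.count f ≠ 0 := by simpa [List.count_eq_zero] using h
    simp [h, this]
  · have : m.count f = 0 := by simpa [List.count_eq_zero] using h
    simp [h, this]
theorem find?_filter_key {κ ν : Type} [BEq κ] [LawfulBEq κ] [DecidableEq κ]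
    (l : List (κ × ν)) (k k' : κ) :
    (l.filter (fun p => !(p.1 == k))).find? (fun p => p.1 == k') =
      if k' = k then none else l.find? (fun p => p.1 == k') := by
  induction l with
  | nil => simp
  | cons p l ih =>
    by_cases hpk : p.1 = k
    · rw [List.filter_cons_of_neg (by simp [hpk]), ih]
      by_cases hk : k' = k
      · simp [hk]
      · rw [if_neg hk, List.find?_cons_of_neg (by simp only [hpk, beq_iff_eq]; exact fun h => hk h.symm), if_neg hk]
    · rw [List.filter_cons_of_pos (by simp [hpk])]
      by_cases hpk' : p.1 = k'
      · rw [List.find?_cons_of_pos (by simp [hpk']), List.find?_cons_of_pos (by simp [hpk']),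
          if_neg (by rintro rfl; exact hpk hpk')]
      · rw [List.find?_cons_of_neg (by simp [hpk']), List.find?_cons_of_neg (by simp [hpk']), ih]

theorem get?_erase {κ ν : Type} [BEq κ] [LawfulBEq κ] [DecidableEq κ] (d : PySem.Dict κ ν) (k k' : κ) :
    (d.erase k).get? k' = if k' = k then none else d.get? k' := by
  obtain ⟨l⟩ := d
  unfold PySem.Dict.erase PySem.Dict.get?
  simp only [find?_filter_key l k k']
  by_cases hk : k' = k <;> simp [hk]
theorem nodup_keys_erase {κ ν : Type} [BEq κ] (d : PySem.Dict κ ν) (k : κ)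
    (h : d.keys.Nodup) : (d.erase k).keys.Nodup := by
  unfold PySem.Dict.erase PySem.Dict.keys at *
  exact List.Nodup.sublist ((List.filter_sublist).map _) h
theorem slice_self (xs : List String) (a : Int) (h0 : 0 ≤ a) :
    PySem.List.slice xs (some a) (some a) = [] := by
  rw [PySem.List.slice_toNat xs h0 h0]; simp
theorem slice_all (xs : List String) (a b : Int) (h0 : 0 ≤ a) (hb : (xs.length : Int) ≤ b) :
    PySem.List.slice xs (some a) (some b) = xs.drop a.toNat := by
  rw [PySem.List.slice_toNat xs h0 (le_trans (by positivity) hb)]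
  apply List.take_of_length_le
  rw [List.length_drop]
  omega
theorem slice_append (xs : List String) (a b c : Int) (h0 : 0 ≤ a) (hab : a ≤ b) (hbc : b ≤ c) :
    PySem.List.slice xs (some a) (some c) =
      PySem.List.slice xs (some a) (some b) ++ PySem.List.slice xs (some b) (some c) := by
  have hb0 : 0 ≤ b := le_trans h0 hab
  have hc0 : 0 ≤ c := le_trans hb0 hbc
  rw [PySem.List.slice_toNat xs h0 hc0, PySem.List.slice_toNat xs h0 hb0,
    PySem.List.slice_toNat xs hb0 hc0]
  have h1 : c.toNat - a.toNat = (b.toNat - a.toNat) + (c.toNat - b.toNat) := by omega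
  rw [h1, List.take_add, List.drop_drop]
  have h2 : a.toNat + (b.toNat - a.toNat) = b.toNat := by omega
  rw [Nat.add_comm] at h2 ⊢
  rw [h2]
theorem pyRange_neg_empty (b s : Int) (hb : 0 ≤ b) (hs : s < 0) :
    PySem.List.pyRange 0 b s = [] := by
  unfold PySem.List.pyRange
  have h1 : ¬ s = 0 := by omega
  have h2 : ¬ 0 < s := by omega
  have h3 : ¬ b < 0 := by omega
  simp [h1, h2, h3]

-- removing the elements of rem from a counter of (rem ++ rest) leaves a counter of rest
theorem remove_fold (rem rest : List String) (cur : PySem.Dict String Int)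
    (hlk : ∀ f, cur.get? f = cntLk (rem ++ rest) f) (hnd : cur.keys.Nodup) :
    (∀ f, (rem.foldl wcRemove cur).get? f = cntLk rest f) ∧
      (rem.foldl wcRemove cur).keys.Nodup ∧
      (∀ k, k ∈ (rem.foldl wcRemove cur).keys → k ∈ cur.keys) := by
  induction rem generalizing cur with
  | nil => exact ⟨by simpa using hlk, hnd, fun k hk => hk⟩
  | cons x rem ih =>
    set N : Int := ((rem ++ rest).count x : Int) with hN
    have hsome : cur.get? x = some (N + 1) := by
      rw [hlk x]
      unfold cntLk
      rw [if_neg (by simp)]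
      congr 1
      simp [hN]
    have hgetD : cur.getD x 0 = N + 1 := by
      rw [PySem.Dict.getD_eq_get?_getD, hsome]; rfl
    have hw : wcRemove cur x = if N ≠ 0 then cur.insert x N else cur.erase x := by
      unfold wcRemove
      rw [hgetD]
      norm_num
    have step_lk : ∀ f, (wcRemove cur x).get? f = cntLk (rem ++ rest) f := by
      intro f
      rw [hw]
      by_cases hfx : f = x
      · rw [hfx]
        by_cases hz : N = 0
        · simp only [hz, ne_eq, not_true_eq_false, if_false]
          rw [get?_erase, if_pos rfl]
          unfold cntLk
          have hcz : (rem ++ rest).count x = 0 := by exact_mod_cast hN.symm.trans hz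
          rw [if_pos hcz]
        · simp only [ne_eq, hz, not_false_eq_true, if_true]
          rw [PySem.Dict.get?_insert, if_pos rfl]
          unfold cntLk
          rw [if_neg (fun h => hz (by rw [hN, h]; rfl))]
      · have hrw : cntLk ((x :: rem) ++ rest) f = cntLk (rem ++ rest) f := by
          unfold cntLk
          rw [List.cons_append, List.count_cons_of_ne (Ne.symm hfx)]
        by_cases hz : N = 0 <;> simp only [hz, ne_eq, not_true_eq_false, if_false,
          not_false_eq_true, if_true]
        · rw [get?_erase, if_neg hfx, hlk f, hrw]
        · rw [PySem.Dict.get?_insert, if_neg hfx, hlk f, hrw]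
    have step_nd : (wcRemove cur x).keys.Nodup := by
      rw [hw]
      by_cases hz : N = 0 <;> simp only [hz, ne_eq, not_true_eq_false, if_false,
        not_false_eq_true, if_true]
      · exact nodup_keys_erase cur x hnd
      · exact PySem.Dict.nodup_keys_insert cur x N hnd
    have step_sub : ∀ k, k ∈ (wcRemove cur x).keys → k ∈ cur.keys := by
      intro k hk
      rw [← PySem.Dict.contains_iff_mem_keys, PySem.Dict.contains_eq_isSome_get?] at hk ⊢
      rw [hw] at hk
      by_cases hkx : k = x
      · subst hkx; rw [hsome]; rfl
      · by_cases hz : N = 0 <;> simp only [hz, ne_eq, not_true_eq_false, if_false,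
          not_false_eq_true, if_true] at hk
        · rwa [get?_erase, if_neg hkx] at hk
        · rwa [PySem.Dict.get?_insert, if_neg hkx] at hk
    obtain ⟨a, b, c⟩ := ih (wcRemove cur x) step_lk step_nd
    exact ⟨by simpa using a, by simpa using b,
      fun k hk => step_sub k (c k (by simpa using hk))⟩

theorem add_fold_lk (add rest : List String) (cur : PySem.Dict String Int)
    (hlk : ∀ f, cur.get? f = cntLk rest f) :
    ∀ f, (add.foldl wcAdd cur).get? f = cntLk (rest ++ add) f := by
  induction add generalizing rest cur with
  | nil => simpa using hlk
  | cons x add ih =>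
    have hgd : cur.getD x 0 = (rest.count x : Int) := by
      rw [PySem.Dict.getD_eq_get?_getD, hlk x]
      unfold cntLk
      split_ifs with h
      · simp [h]
      · rfl
    have step_lk : ∀ f, (wcAdd cur x).get? f = cntLk (rest ++ [x]) f := by
      intro f
      unfold wcAdd
      rw [PySem.Dict.get?_insert]
      by_cases hfx : f = x
      · subst hfx
        rw [if_pos rfl, hgd]
        unfold cntLk
        rw [if_neg (by simp)]
        push_cast
        simp
      · rw [if_neg hfx, hlk f]
        unfold cntLk
        rw [List.count_append, List.count_singleton]
        have hxf : ¬ x = f := fun h => hfx h.symm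
        simp [hxf]
    have := ih (rest ++ [x]) (wcAdd cur x) step_lk
    intro f
    have hres := this f
    rw [List.foldl_cons]
    rw [hres]
    unfold cntLk
    rw [List.append_assoc, List.singleton_append]

theorem add_fold_keys (add : List String) (cur : PySem.Dict String Int) :
    (add.foldl wcAdd cur).keys = PySem.Set.update cur.keys add := by
  have h : wcAdd = fun (d : PySem.Dict String Int) x => d.insert x (d.getD x 0 + 1) := rfl
  rw [h]
  exact PySem.Dict.keys_foldl_insert add _ cur

theorem add_fold_nodup (add : List String) (cur : PySem.Dict String Int)
    (hnd : cur.keys.Nodup) : (add.foldl wcAdd cur).keys.Nodup := by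
  have h : wcAdd = fun (d : PySem.Dict String Int) x => d.insert x (d.getD x 0 + 1) := rfl
  rw [h]
  exact PySem.Dict.nodup_keys_foldl_insert add _ cur hnd

-- the keys a Set.update appends: first occurrences of elements not in the base
def newKeys (ks l : List String) : List String :=
  match l with
  | [] => []
  | x :: l => if ks.contains x then newKeys ks l else x :: newKeys (ks ++ [x]) l

theorem newKeys_cons (ks : List String) (x : String) (l : List String) :
    newKeys ks (x :: l) =
      if ks.contains x then newKeys ks l else x :: newKeys (ks ++ [x]) l := rfl

theorem set_update_eq (ks l : List String) :
    PySem.Set.update ks l = ks ++ newKeys ks l := by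
  induction l generalizing ks with
  | nil => simp [PySem.Set.update, newKeys]
  | cons x l ih =>
    show PySem.Set.update (PySem.Set.add ks x) l = _
    rw [newKeys_cons]
    by_cases hx : x ∈ ks
    · rw [show PySem.Set.add ks x = ks from by simp [PySem.Set.add, hx], ih,
        if_pos (by simpa using hx)]
    · rw [show PySem.Set.add ks x = ks ++ [x] from by simp [PySem.Set.add, hx], ih,
        if_neg (by simpa using hx), List.append_assoc]
      rfl

theorem newKeys_congr (l : List String) (ks₁ ks₂ : List String)
    (h : ∀ x, x ∈ ks₁ ↔ x ∈ ks₂) : newKeys ks₁ l = newKeys ks₂ l := by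
  induction l generalizing ks₁ ks₂ with
  | nil => rfl
  | cons x l ih =>
    rw [newKeys_cons, newKeys_cons]
    by_cases hx : x ∈ ks₁
    · rw [if_pos (by simpa using hx), if_pos (by simpa using (h x).mp hx), ih ks₁ ks₂ h]
    · rw [if_neg (by simpa using hx), if_neg (by simpa using fun hc => hx ((h x).mpr hc)),
        ih (ks₁ ++ [x]) (ks₂ ++ [x]) (by intro y; simp [h y])]

theorem newKeys_filter (l : List String) (p : String → Bool) (ks : List String)
    (h : ∀ x ∈ l, p x = false → x ∈ ks) :
    newKeys ks (l.filter p) = newKeys ks l := by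
  induction l generalizing ks with
  | nil => rfl
  | cons x l ih =>
    by_cases hp : p x
    · rw [List.filter_cons_of_pos hp, newKeys_cons, newKeys_cons]
      by_cases hx : x ∈ ks
      · rw [if_pos (by simpa using hx), if_pos (by simpa using hx),
          ih ks (fun y hy hpy => h y (List.mem_cons_of_mem x hy) hpy)]
      · rw [if_neg (by simpa using hx), if_neg (by simpa using hx), ih (ks ++ [x])
          (fun y hy hpy => List.mem_append_left [x] (h y (List.mem_cons_of_mem x hy) hpy))]
    · rw [List.filter_cons_of_neg hp]
      have hxk : x ∈ ks := h x List.mem_cons_self (by simpa using hp)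
      rw [newKeys_cons, if_pos (by simpa using hxk)]
      exact ih ks (fun y hy hpy => h y (List.mem_cons_of_mem x hy) hpy)

theorem mem_set_update (ks l : List String) (x : String) (h : x ∈ ks ∨ x ∈ l) :
    x ∈ PySem.Set.update ks l := by
  induction l generalizing ks with
  | nil => simpa [PySem.Set.update] using h.resolve_right (by simp)
  | cons y l ih =>
    show x ∈ PySem.Set.update (PySem.Set.add ks y) l
    apply ih
    rcases h with h | h
    · exact Or.inl (by by_cases hy : y ∈ ks <;> simp [PySem.Set.add, hy, h])
    · rcases List.mem_cons.mp h with rfl | h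
      · refine Or.inl ?_
        by_cases hy : x ∈ ks <;> simp [PySem.Set.add, hy]
      · exact Or.inr h

theorem filtered_vals {κ ν : Type} [BEq κ] [LawfulBEq κ] (d : PySem.Dict κ ν)
    (hnd : d.keys.Nodup) (c : κ) :
    (d.items.filter (fun p => p.1 == c)).map (·.2) = (d.get? c).toList := by
  obtain ⟨l⟩ := d
  unfold PySem.Dict.get? PySem.Dict.keys at *
  simp only [PySem.Dict.items] at *
  induction l with
  | nil => simp
  | cons p l ih =>
    simp only [List.map_cons, List.nodup_cons] at hnd
    by_cases hpc : p.1 = c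
    · rw [List.filter_cons_of_pos (by simp [hpc]), List.find?_cons_of_pos (by simp [hpc])]
      have hnil : l.filter (fun q => q.1 == c) = [] := by
        apply List.filter_eq_nil_iff.mpr
        intro q hq
        simp only [beq_iff_eq]
        intro hqc
        exact hnd.1 (List.mem_map.mpr ⟨q, hq, hqc.trans hpc.symm⟩)
      rw [hnil]
      simp
    · rw [List.filter_cons_of_neg (by simp [hpc]), List.find?_cons_of_neg (by simp [hpc])]
      exact ih hnd.2

theorem keys_wcFlush (cur : PySem.Dict String Int) (counts : PySem.Dict String (List Int)) :
    (wcFlush cur counts).keys = PySem.Set.update counts.keys cur.keys := by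
  unfold wcFlush
  have := PySem.Dict.keys_foldl_modify_key (κ := String) (ν := List Int) cur.items
    (fun p => p.1) [] (fun _ p l => l ++ [p.2]) counts
  exact this

theorem nodup_keys_wcFlush (cur : PySem.Dict String Int) (counts : PySem.Dict String (List Int))
    (h : counts.keys.Nodup) : (wcFlush cur counts).keys.Nodup := by
  unfold wcFlush
  exact PySem.Dict.nodup_keys_foldl_modify_key cur.items (fun p => p.1) []
    (fun _ p l => l ++ [p.2]) counts h

-- flushing two lookup-equal counters with identical fresh-key order gives the same dict
theorem flush_congr (C : PySem.Dict String (List Int)) (d₁ d₂ : PySem.Dict String Int)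
    (hC : C.keys.Nodup) (h1 : d₁.keys.Nodup) (h2 : d₂.keys.Nodup)
    (hlk : ∀ k, d₁.get? k = d₂.get? k)
    (hnew : d₁.keys.filter (fun k => !C.keys.contains k) =
      d₂.keys.filter (fun k => !C.keys.contains k)) :
    wcFlush d₁ C = wcFlush d₂ C := by
  have hkeys : (wcFlush d₁ C).keys = (wcFlush d₂ C).keys := by
    rw [keys_wcFlush, keys_wcFlush, set_update_eq, set_update_eq,
      ← newKeys_filter d₁.keys (fun k => !C.keys.contains k) C.keys (by intro x _ hx; simpa using hx),
      ← newKeys_filter d₂.keys (fun k => !C.keys.contains k) C.keys (by intro x _ hx; simpa using hx),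
      hnew]
  have hgetD : ∀ c, (wcFlush d₁ C).getD c [] = (wcFlush d₂ C).getD c [] := by
    intro c
    unfold wcFlush
    rw [PySem.Dict.getD_foldl_modify_append, PySem.Dict.getD_foldl_modify_append,
      filtered_vals d₁ h1 c, filtered_vals d₂ h2 c, hlk c]
  apply PySem.Dict.ext
  rw [PySem.Dict.items_eq_map_keys _ (nodup_keys_wcFlush d₁ C hC) [],
    PySem.Dict.items_eq_map_keys _ (nodup_keys_wcFlush d₂ C hC) [], hkeys]
  exact List.map_congr_left (fun k _ => by rw [hgetD k])
theorem mem_keys_iff_of_cnt (d : PySem.Dict String Int) (m : List String)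
    (h : ∀ f, d.get? f = cntLk m f) : ∀ x, x ∈ d.keys ↔ x ∈ m := by
  intro x
  rw [← PySem.Dict.contains_iff_mem_keys, PySem.Dict.contains_eq_isSome_get?, h x]
  unfold cntLk
  by_cases hc : m.count x = 0
  · simp [hc, List.count_eq_zero.mp hc]
  · simp [hc, List.count_pos_iff.mp (Nat.pos_of_ne_zero hc)]

-- the main loop invariant: A's dict equals B's dict, and B's sliding counter is
-- lookup-equal to the counter of the current window slice
theorem wc_loop (items : List String) (ws n : Int) (hn : n = (items.length : Int)) (hws : 0 < ws)
    (ss : List Int) (counts : PySem.Dict String (List Int)) (cur : PySem.Dict String Int)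
    (plo phi : Int)
    (hss : ∀ s ∈ ss, plo ≤ s) (hsort : ss.Pairwise (· ≤ ·)) (hub : ∀ s ∈ ss, s ≤ n)
    (h0 : 0 ≤ plo) (hlp : plo ≤ phi) (hpn : phi ≤ n) (hpw : phi ≤ plo + ws)
    (hcur : ∀ f, cur.get? f = cntLk (PySem.List.slice items (some plo) (some phi)) f)
    (hndC : counts.keys.Nodup) (hnd : cur.keys.Nodup)
    (hsub : ∀ k ∈ cur.keys, k ∈ counts.keys) :
    ss.foldl (wcStepA items ws) counts =
      (ss.foldl (wcStepB items ws n) (counts, cur, plo, phi)).1 := by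
  induction ss generalizing counts cur plo phi with
  | nil => rfl
  | cons s ss ih =>
    have hs0 : plo ≤ s := hss s List.mem_cons_self
    have hsn : s ≤ n := hub s List.mem_cons_self
    have hs00 : 0 ≤ s := le_trans h0 hs0
    have hphi0 : 0 ≤ phi := le_trans h0 hlp
    set hi := min (s + ws) n with hhi
    set rem := PySem.List.slice items (some plo) (some (min s phi)) with hrem
    set retained := PySem.List.slice items (some (min s phi)) (some phi) with hretained
    set addSeg := PySem.List.slice items (some (max s phi)) (some hi) with haddSeg
    set w := PySem.List.slice items (some s) (some hi) with hwdef
    set cur₁ := rem.foldl wcRemove cur with hc1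
    set cur₂ := addSeg.foldl wcAdd cur₁ with hc2
    have hlohi : s ≤ hi := le_min (by omega) hsn
    have hhi_ge : phi ≤ hi := le_min (by omega) hpn
    have hA : PySem.List.slice items (some plo) (some phi) = rem ++ retained :=
      slice_append items plo (min s phi) phi h0 (le_min hs0 hlp) (min_le_right _ _)
    have hB : w = retained ++ addSeg := by
      by_cases hcase : s ≤ phi
      · rw [hwdef, hretained, haddSeg, min_eq_left hcase, max_eq_right hcase]
        exact slice_append items s phi hi hs00 hcase hhi_ge
      · have hcase' : phi < s := lt_of_not_ge hcase
        rw [hwdef, hretained, haddSeg, min_eq_right (le_of_lt hcase'),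
          max_eq_left (le_of_lt hcase'), slice_self items phi hphi0, List.nil_append]
    obtain ⟨hlk₁, hnd₁, hsub₁⟩ := remove_fold rem retained cur (by rw [← hA]; exact hcur) hnd
    have hlk₂ : ∀ f, cur₂.get? f = cntLk w f := by
      intro f
      rw [hB]
      exact add_fold_lk addSeg retained cur₁ hlk₁ f
    have hnd₂ : cur₂.keys.Nodup := add_fold_nodup addSeg cur₁ hnd₁
    have hkeys₂ : cur₂.keys = PySem.Set.update cur₁.keys addSeg := add_fold_keys addSeg cur₁
    have hmem_cur : ∀ x, x ∈ cur.keys ↔ x ∈ PySem.List.slice items (some plo) (some phi) :=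
      mem_keys_iff_of_cnt cur _ hcur
    have hmem₁ : ∀ x, x ∈ cur₁.keys ↔ x ∈ retained := mem_keys_iff_of_cnt cur₁ retained hlk₁
    have hret_sub : ∀ x ∈ retained, x ∈ counts.keys := by
      intro x hx
      exact hsub x ((hmem_cur x).mpr (by rw [hA]; exact List.mem_append_right rem hx))
    have hsub_counts₁ : ∀ x ∈ cur₁.keys, x ∈ counts.keys := fun x hx => hsub x (hsub₁ x hx)
    have hflush : wcFlush (PySem.Dict.counter w) counts = wcFlush cur₂ counts := by
      apply flush_congr counts _ _ hndC (PySem.Dict.nodup_keys_counter w) hnd₂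
      · intro k
        rw [counter_get? w k, hlk₂ k]
      · have hsplit : (PySem.Dict.counter w).keys =
            PySem.Set.update (PySem.Set.ofList retained) addSeg := by
          rw [PySem.Dict.keys_counter, hB]
          unfold PySem.Set.ofList PySem.Set.update
          rw [List.foldl_append]
        have hK : ∀ x, x ∈ PySem.Set.ofList retained ↔ x ∈ cur₁.keys := fun x => by
          rw [PySem.Set.mem_ofList]
          exact (hmem₁ x).symm
        have hnil₁ : (PySem.Set.ofList retained).filter
            (fun k => !counts.keys.contains k) = [] :=
          List.filter_eq_nil_iff.mpr (fun x hx => by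
            have hm : x ∈ counts.keys := hret_sub x ((PySem.Set.mem_ofList retained x).mp hx)
            simp [hm])
        have hnil₂ : cur₁.keys.filter (fun k => !counts.keys.contains k) = [] :=
          List.filter_eq_nil_iff.mpr (fun x hx => by
            have hm : x ∈ counts.keys := hsub_counts₁ x hx
            simp [hm])
        rw [hsplit, hkeys₂, set_update_eq, set_update_eq, newKeys_congr addSeg _ _ hK,
          List.filter_append, List.filter_append, hnil₁, hnil₂]
    have hw_eq : PySem.List.slice items (some s) (some (s + ws)) = w := by
      by_cases hc : s + ws ≤ n
      · rw [hwdef, hhi, min_eq_left hc]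
      · have hc' : n < s + ws := lt_of_not_ge hc
        rw [hwdef, hhi, min_eq_right (le_of_lt hc'),
          slice_all items s (s + ws) hs00 (by omega),
          slice_all items s n hs00 (by omega)]
    have hstepA : wcStepA items ws counts s = wcFlush cur₂ counts := by
      unfold wcStepA
      rw [hw_eq, hflush]
    have hstepB : wcStepB items ws n (counts, cur, plo, phi) s =
        (wcFlush cur₂ counts, cur₂, s, hi) := rfl
    rw [List.foldl_cons, List.foldl_cons, hstepA, hstepB]
    exact ih (wcFlush cur₂ counts) cur₂ s hi
      (fun t ht => (List.pairwise_cons.mp hsort).1 t ht)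
      (List.pairwise_cons.mp hsort).2
      (fun t ht => hub t (List.mem_cons_of_mem s ht))
      hs00 hlohi (min_le_right _ _) (min_le_left _ _)
      hlk₂ (nodup_keys_wcFlush cur₂ counts hndC) hnd₂
      (fun k hk => by rw [keys_wcFlush]; exact mem_set_update _ _ k (Or.inr hk))

-- ===== VERDICT (by name: the statement is the Claim_ definition above) =====
theorem window_counts_spec : Claim_equal_window_counts := by
  unfold Claim_equal_window_counts Spec_window_counts
  intro items ws stride _ hpre
  unfold window_counts window_counts_alt
  by_cases hguard : items = [] ∨ ws ≤ 0
  · rw [if_pos hguard, if_pos hguard]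
  · rw [if_neg hguard, if_neg hguard]
    have hne : items ≠ [] := fun h => hguard (Or.inl h)
    have hws : 0 < ws := lt_of_not_ge fun h => hguard (Or.inr h)
    have hstr : stride ≠ 0 := by
      rcases hpre with h | h | h
      · exact absurd h hne
      · omega
      · exact h
    have hn1 : (1 : Int) ≤ (items.length : Int) := by
      have := List.length_pos_iff.mpr hne
      omega
    rcases lt_or_gt_of_ne hstr with hneg | hpos
    · rw [pyRange_neg_empty (max ((items.length : Int) - ws + 1) 1) stride
        (le_trans (by omega) (le_max_right _ 1)) hneg]
      rfl
    · refine congrArg PySem.Dict.items ?_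
      apply wc_loop items ws ((items.length : Int)) rfl hws
      · intro t ht
        exact ((PySem.List.mem_pyRange_iff_of_pos hpos t).mp ht).1
      · rw [PySem.List.pyRange_of_pos 0 (max ((items.length : Int) - ws + 1) 1) hpos]
        refine List.pairwise_map.mpr (List.Pairwise.imp ?_ List.pairwise_lt_range)
        intro a b hab
        have hab' : (a : Int) ≤ (b : Int) := by exact_mod_cast le_of_lt hab
        have := mul_le_mul_of_nonneg_left hab' (le_of_lt hpos)
        omega
      · intro t ht
        obtain ⟨h1, h2, -⟩ := (PySem.List.mem_pyRange_iff_of_pos hpos t).mp ht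
        rcases max_cases ((items.length : Int) - ws + 1) 1 with ⟨heq, _⟩ | ⟨heq, _⟩ <;> omega
      · exact le_rfl
      · exact le_rfl
      · omega
      · omega
      · intro f
        rw [slice_self items 0 le_rfl]
        simp [PySem.Dict.get?_empty, cntLk]
      · simp [PySem.Dict.keys]
        exact List.Pairwise.nil
      · simp [PySem.Dict.keys]
        exact List.Pairwise.nil
      · intro k hk
        simp [PySem.Dict.keys, PySem.Dict.empty] at hk
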